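-- pv_equiv track=rewrite | github.com/L0N3M4N/Kryptos-The-Unbreakable-Secret-Code | kryptos_k4.py | makefft
-- ===== SOURCE A (Python) =====
-- def makefft(k4in, bcarray):
--
--     uplower = k4in
--
--     #Find the original 11 indicies of the scrambled BERLINCLOCK cyphertext
--     cipharray = bcarray[63:74]
--
--     #Loop through the berlinclock indicies and make those 11 characters uppercase in the ciphertext
--     ulout = ""
--     fftprep = []
--     for ctall in range(0, len(uplower)):
--         flagfound = 0
--         for loopca in range(0, len(cipharray)):
--
--             #If this is character 13 in the ciphertext and [13] was found in the BC array, we have a match!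
--             if ctall == cipharray[loopca]:
--                 flagfound = 1
--                 break
--
--         if flagfound == 1:
--             ulout += uplower[ctall].upper()
--             fftprep += [1]
--         else:
--             ulout +=  uplower[ctall].lower()
--             fftprep += [0]
--
--     return(ulout, fftprep)
-- ===== SOURCE B (Python) =====
-- def makefft(k4in, bcarray):
--     n = len(k4in)
--     chars = [c.lower() for c in k4in]
--     flags = [0] * n
--     for idx in bcarray[63:74]:
--         if 0 <= idx < n:
--             chars[idx] = k4in[idx].upper()
--             flags[idx] = 1
--     return ("".join(chars), flags)
-- ===== Notes on version B (the rewrite author's own statement) =====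
-- stated objective: faster
-- what changed: Replaces the nested gather (for every character, scan the 11-element index slice) by a single scatter pass: lowercase everything once, then write the uppercase character and flag directly at each in-range index from bcarray[63:74].
import Mathlib
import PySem

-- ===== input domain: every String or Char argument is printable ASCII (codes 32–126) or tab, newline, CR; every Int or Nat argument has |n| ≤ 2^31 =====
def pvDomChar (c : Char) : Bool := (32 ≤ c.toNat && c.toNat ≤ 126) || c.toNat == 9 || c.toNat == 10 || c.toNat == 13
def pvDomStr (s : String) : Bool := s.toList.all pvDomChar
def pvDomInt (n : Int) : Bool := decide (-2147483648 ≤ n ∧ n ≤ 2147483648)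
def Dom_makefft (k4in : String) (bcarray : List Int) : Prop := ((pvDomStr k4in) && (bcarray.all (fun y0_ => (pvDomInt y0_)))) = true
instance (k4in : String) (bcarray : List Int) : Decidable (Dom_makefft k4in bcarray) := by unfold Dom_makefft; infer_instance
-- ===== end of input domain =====

-- B replaces A's nested gather (scan the 11-index slice for every character) by one
-- lowercase pass plus a direct scatter of the in-range indices into the output buffers.

-- ===== PORT A =====
-- inner loop of A: scan cipharray for ctall, break on the first match (flagfound)
def makefftScan (ctall : Int) : List Int → Bool
  | [] => false
  | c :: rest => if ctall = c then true else makefftScan ctall rest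

def makefft (k4in : String) (bcarray : List Int) : String × List Int :=
  let uplower := k4in
  let cipharray := PySem.List.slice bcarray (some 63) (some 74)
  (PySem.List.pyRange 0 (PySem.Str.len uplower) 1).foldl
    (fun (acc : String × List Int) ctall =>
      if makefftScan ctall cipharray then
        (acc.1.push (PySem.Chars.upperChar (PySem.List.pyGetD uplower.toList ctall ' ')), acc.2 ++ [1])
      else
        (acc.1.push (PySem.Chars.lowerChar (PySem.List.pyGetD uplower.toList ctall ' ')), acc.2 ++ [0]))
    ("", [])

-- ===== PORT B =====
def makefft_alt (k4in : String) (bcarray : List Int) : String × List Int :=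
  let s := k4in.toList
  let n := s.length
  let chars := s.map PySem.Chars.lowerChar
  let flags := List.replicate n (0 : Int)
  let r := (PySem.List.slice bcarray (some 63) (some 74)).foldl
    (fun (st : List Char × List Int) idx =>
      if 0 ≤ idx ∧ idx < (n : Int) then
        (st.1.set idx.toNat (PySem.Chars.upperChar (PySem.List.pyGetD s idx ' ')),
         st.2.set idx.toNat 1)
      else st) (chars, flags)
  (String.ofList r.1, r.2)

-- ===== PRECONDITION & SPEC =====
def Spec_makefft (k4in : String) (bcarray : List Int) (out : String × List Int) : Prop := out = makefft_alt k4in bcarray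
instance (k4in : String) (bcarray : List Int) (out : String × List Int) : Decidable (Spec_makefft k4in bcarray out) := by unfold Spec_makefft; infer_instance

-- ===== CLAIM (what is proved, stated in full; the proofs are below) =====
def Claim_equal_makefft : Prop := ∀ (k4in : String) (bcarray : List Int), Dom_makefft k4in bcarray → Spec_makefft k4in bcarray (makefft k4in bcarray)

-- ===== LEMMAS AND PROOFS =====

theorem makefftScan_eq_mem (c : Int) (l : List Int) : makefftScan c l = decide (c ∈ l) := by
  induction l with
  | nil => simp [makefftScan]
  | cons x xs ih => by_cases h : c = x <;> simp [makefftScan, h, ih]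

-- A's per-index character and flag
def aChar (s : List Char) (ca : List Int) (i : Int) : Char :=
  if makefftScan i ca then PySem.Chars.upperChar (PySem.List.pyGetD s i ' ')
  else PySem.Chars.lowerChar (PySem.List.pyGetD s i ' ')

def aFlag (ca : List Int) (i : Int) : Int := if makefftScan i ca then 1 else 0

-- the A-side fold appends one character and one flag per index
theorem foldA_append (s : List Char) (ca : List Int) (l : List Int) (a : String) (b : List Int) :
    l.foldl
      (fun (acc : String × List Int) ctall =>
        if makefftScan ctall ca then
          (acc.1.push (PySem.Chars.upperChar (PySem.List.pyGetD s ctall ' ')), acc.2 ++ [1])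
        else
          (acc.1.push (PySem.Chars.lowerChar (PySem.List.pyGetD s ctall ' ')), acc.2 ++ [0]))
      (a, b)
      = (String.ofList (a.toList ++ l.map (aChar s ca)), b ++ l.map (aFlag ca)) := by
  induction l generalizing a b with
  | nil => simp
  | cons x xs ih =>
      by_cases h : makefftScan x ca <;>
        simp [h, ih, aChar, aFlag, List.append_assoc]

-- B's scatter step
def scatterStep (s : List Char) (st : List Char × List Int) (idx : Int) : List Char × List Int :=
  if 0 ≤ idx ∧ idx < (s.length : Int) then
    (st.1.set idx.toNat (PySem.Chars.upperChar (PySem.List.pyGetD s idx ' ')),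
     st.2.set idx.toNat 1)
  else st

-- the B-side scatter: lengths are preserved and a slot is written iff its index occurs
theorem scatter_spec (s : List Char) (ca : List Int) (c0 : List Char) (f0 : List Int)
    (hc : c0.length = s.length) (hf : f0.length = s.length) :
    (ca.foldl (scatterStep s) (c0, f0)).1.length = s.length ∧
    (ca.foldl (scatterStep s) (c0, f0)).2.length = s.length ∧
    ∀ i : Nat, i < s.length →
      (ca.foldl (scatterStep s) (c0, f0)).1[i]?
        = (if (i : Int) ∈ ca then some (PySem.Chars.upperChar (PySem.List.pyGetD s (i : Int) ' ')) else c0[i]?) ∧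
      (ca.foldl (scatterStep s) (c0, f0)).2[i]?
        = (if (i : Int) ∈ ca then some 1 else f0[i]?) := by
  induction ca generalizing c0 f0 with
  | nil => exact ⟨hc, hf, fun i hi => by simp⟩
  | cons x xs ih =>
      simp only [List.foldl_cons]
      by_cases hx : 0 ≤ x ∧ x < (s.length : Int)
      · simp only [scatterStep, if_pos hx]
        have ih' := ih (c0.set x.toNat (PySem.Chars.upperChar (PySem.List.pyGetD s x ' ')))
          (f0.set x.toNat 1) (by simpa using hc) (by simpa using hf)
        refine ⟨ih'.1, ih'.2.1, fun i hi => ?_⟩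
        have h2 := ih'.2.2 i hi
        by_cases hmem : (i : Int) ∈ xs
        · have hm : (i : Int) ∈ x :: xs := by simp [hmem]
          simpa [hmem, hm] using h2
        · by_cases hix : (i : Int) = x
          · have hxi : x.toNat = i := by omega
            have hm : (i : Int) ∈ x :: xs := by simp [hix]
            rw [h2.1, h2.2]
            simp only [hmem, hm, if_pos]
            constructor
            · simp [hxi, hc, hi, hix]
            · simp [hxi, hf, hi]
          · have hm : ¬ (i : Int) ∈ x :: xs := by simp [hmem, hix]
            rw [h2.1, h2.2]
            have hne : x.toNat ≠ i := by omega
            simp [hmem, hm, hne]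
      · simp only [scatterStep, if_neg hx]
        have ih' := ih c0 f0 hc hf
        refine ⟨ih'.1, ih'.2.1, fun i hi => ?_⟩
        have h2 := ih'.2.2 i hi
        have hix : ¬ (i : Int) = x := by omega
        by_cases hmem : (i : Int) ∈ xs
        · have hm : (i : Int) ∈ x :: xs := by simp [hmem]
          simpa [hmem, hm] using h2
        · have hm : ¬ (i : Int) ∈ x :: xs := by simp [hmem, hix]
          simpa [hmem, hm] using h2

theorem map_pyRange_zero {α : Type} (n : Nat) (f : Int → α) :
    (PySem.List.pyRange 0 (n : Int) 1).map f = (List.range n).map (fun k : Nat => f (k : Int)) := by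
  rw [PySem.List.pyRange_one, List.map_map]
  simp only [Int.sub_zero, Int.toNat_natCast, Function.comp_def, zero_add]

theorem makefft_eq (k4in : String) (bcarray : List Int) :
    makefft k4in bcarray = makefft_alt k4in bcarray := by
  unfold makefft makefft_alt
  simp only []
  have hlen : PySem.Str.len k4in = ((k4in.toList.length : Nat) : Int) := by
    simp [PySem.Str.len]
  rw [foldA_append k4in.toList (PySem.List.slice bcarray (some 63) (some 74))]
  have hfold : (PySem.List.slice bcarray (some 63) (some 74)).foldl
      (fun (st : List Char × List Int) idx =>
        if 0 ≤ idx ∧ idx < ((k4in.toList.length : Nat) : Int) then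
          (st.1.set idx.toNat (PySem.Chars.upperChar (PySem.List.pyGetD k4in.toList idx ' ')),
           st.2.set idx.toNat 1)
        else st)
      (k4in.toList.map PySem.Chars.lowerChar, List.replicate k4in.toList.length 0)
      = (PySem.List.slice bcarray (some 63) (some 74)).foldl (scatterStep k4in.toList)
        (k4in.toList.map PySem.Chars.lowerChar, List.replicate k4in.toList.length 0) := rfl
  rw [hfold]
  obtain ⟨hl1, hl2, hidx⟩ := scatter_spec k4in.toList (PySem.List.slice bcarray (some 63) (some 74))
    (k4in.toList.map PySem.Chars.lowerChar) (List.replicate k4in.toList.length 0)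
    (by simp) (by simp)
  set s := k4in.toList
  set ca := PySem.List.slice bcarray (some 63) (some 74)
  set r := ca.foldl (scatterStep s) (s.map PySem.Chars.lowerChar, List.replicate s.length 0)
  refine Prod.ext ?_ ?_
  · show String.ofList _ = String.ofList r.1
    rw [hlen, map_pyRange_zero]
    congr 1
    rw [show ("".toList : List Char) = [] from rfl, List.nil_append]
    apply List.ext_getElem?
    intro i
    by_cases hi : i < s.length
    · rw [(hidx i hi).1, List.getElem?_map, List.getElem?_range hi]
      have hget : PySem.List.pyGetD s (i : Int) ' ' = s[i] := by
        rw [PySem.List.pyGetD_natCast, List.getD_eq_getElem s ' ' hi]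
      simp only [Option.map_some, aChar, makefftScan_eq_mem, hget]
      by_cases hmem : (i : Int) ∈ ca
      · simp [hmem]
      · simp [hmem, List.getElem?_map, List.getElem?_eq_getElem hi]
    · rw [List.getElem?_eq_none (by simpa using Nat.le_of_not_lt hi),
          List.getElem?_eq_none (by omega)]
  · show [] ++ _ = r.2
    rw [hlen, List.nil_append, map_pyRange_zero]
    apply List.ext_getElem?
    intro i
    by_cases hi : i < s.length
    · rw [(hidx i hi).2, List.getElem?_map, List.getElem?_range hi]
      simp only [Option.map_some, aFlag, makefftScan_eq_mem]
      by_cases hmem : (i : Int) ∈ ca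
      · simp [hmem]
      · simp [hmem, hi]
    · rw [List.getElem?_eq_none (by simpa using Nat.le_of_not_lt hi),
          List.getElem?_eq_none (by omega)]

-- ===== VERDICT (by name: the statement is the Claim_ definition above) =====
theorem makefft_spec : Claim_equal_makefft := by
  intro k4in bcarray _
  unfold Spec_makefft
  exact makefft_eq k4in bcarray
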